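-- pv_equiv track=rewrite | github.com/TencentBlueKing/bk-audit | src/backend/services/web/risk/resources/risk.py | _split_table_parts
-- ===== SOURCE A (Python) =====
-- from typing import Any, Dict, Iterator, List, Optional, Sequence, Tuple, Type
--
-- def _split_table_parts(table_name: str) -> Tuple[Optional[str], Optional[str], str]:
--     cleaned = (table_name or "").strip().strip("`")
--     if not cleaned:
--         return None, None, ""
--     parts = [part.strip().strip("`") for part in cleaned.split(".") if part.strip()]
--     if not parts:
--         return None, None, ""
--     if len(parts) == 1:
--         return None, None, parts[0]
--     if len(parts) == 2:
--         return None, parts[0], parts[1]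
--     # 当存在 catalog.db.table 或更多层级时，仅保留后三段
--     return parts[-3], parts[-2], parts[-1]
-- ===== SOURCE B (Python) =====
-- def _split_table_parts(table_name):
--     # Single left-to-right pass with a 3-slot shift register; no parts list,
--     # no slicing, no length case analysis.
--     catalog = db = table = None
--     for part in (table_name or "").strip().strip("`").split("."):
--         part = part.strip()
--         if part:
--             catalog, db, table = db, table, part.strip("`")
--     if table is None:
--         return None, None, ""
--     return catalog, db, table
-- ===== Notes on version B (the rewrite author's own statement) =====
-- stated objective: simpler
-- what changed: Replaces A's build-a-parts-list-then-four-way-length-case-analysis with a single pass over the split pieces maintaining a 3-slot shift register (catalog, db, table); no parts list, no negative indexing, no length branches.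
import Mathlib
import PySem

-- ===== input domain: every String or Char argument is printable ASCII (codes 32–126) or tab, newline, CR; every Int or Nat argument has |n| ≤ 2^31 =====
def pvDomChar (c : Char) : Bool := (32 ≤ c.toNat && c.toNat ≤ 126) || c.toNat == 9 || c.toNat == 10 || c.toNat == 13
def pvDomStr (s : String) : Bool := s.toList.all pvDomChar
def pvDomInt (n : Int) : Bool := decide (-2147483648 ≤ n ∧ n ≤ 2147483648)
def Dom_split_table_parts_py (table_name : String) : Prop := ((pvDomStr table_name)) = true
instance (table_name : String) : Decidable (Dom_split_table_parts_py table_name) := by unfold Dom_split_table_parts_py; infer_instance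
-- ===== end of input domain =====

-- B replaces A's parts-list build and four-way length case analysis by a single pass with a
-- 3-slot shift register (catalog, db, table); objective: simpler.

-- ===== PORT A =====
def split_table_parts_py (table_name : String) : Option String × Option String × String :=
  let cleaned := PySem.Str.stripChars (PySem.Str.strip table_name) "`"
  if cleaned = "" then (none, none, "")
  else
    let parts := (((PySem.Str.split? cleaned ".").getD []).filter (fun p => PySem.Str.strip p ≠ "")).map
        (fun p => PySem.Str.stripChars (PySem.Str.strip p) "`")
    if parts = [] then (none, none, "")
    else if parts.length = 1 then (none, none, PySem.List.pyGetD parts 0 "")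
    else if parts.length = 2 then
      (none, some (PySem.List.pyGetD parts 0 ""), PySem.List.pyGetD parts 1 "")
    else
      (some (PySem.List.pyGetD parts (-3) ""), some (PySem.List.pyGetD parts (-2) ""),
       PySem.List.pyGetD parts (-1) "")

-- ===== PORT B =====
def split_table_parts_py_alt (table_name : String) : Option String × Option String × String :=
  let st := ((PySem.Str.split? (PySem.Str.stripChars (PySem.Str.strip table_name) "`") ".").getD []).foldl
      (fun (s : Option String × Option String × Option String) part =>
        let p := PySem.Str.strip part
        if p ≠ "" then (s.2.1, s.2.2, some (PySem.Str.stripChars p "`")) else s)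
      (none, none, none)
  match st with
  | (c, d, some t) => (c, d, t)
  | _ => (none, none, "")

-- ===== PRECONDITION & SPEC =====
def Spec_split_table_parts_py (table_name : String) (out : Option String × Option String × String) : Prop := out = split_table_parts_py_alt table_name
instance (table_name : String) (out : Option String × Option String × String) : Decidable (Spec_split_table_parts_py table_name out) := by unfold Spec_split_table_parts_py; infer_instance

-- ===== CLAIM (what is proved, stated in full; the proofs are below) =====
def Claim_equal_split_table_parts_py : Prop := ∀ (table_name : String), Dom_split_table_parts_py table_name → Spec_split_table_parts_py table_name (split_table_parts_py table_name)

-- ===== LEMMAS AND PROOFS =====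

-- characterization of the shift-register fold by the reversed list
lemma fold_shift_char : ∀ (l : List String) (s : Option String × Option String × Option String),
    l.foldl (fun (s : Option String × Option String × Option String) p => (s.2.1, s.2.2, some p)) s =
      match l.reverse with
      | [] => s
      | [a] => (s.2.1, s.2.2, some a)
      | [a, b] => (s.2.2, some b, some a)
      | a :: b :: c :: _ => (some c, some b, some a) := by
  intro l
  induction l with
  | nil => intro s; simp
  | cons x t ih =>
    intro s
    have h := ih (s.2.1, s.2.2, some x)
    simp only [List.foldl_cons] at *
    rw [h]
    rcases ht : t.reverse with _ | ⟨a, _ | ⟨b, _ | ⟨c, r⟩⟩⟩ <;>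
      simp [List.reverse_cons, ht]

-- negative pyGetD reads the reversed list's heads
lemma pyGetD_neg_reverse (parts : List String) (a b c : String) (r : List String)
    (h : parts.reverse = a :: b :: c :: r) :
    PySem.List.pyGetD parts (-1) "" = a ∧ PySem.List.pyGetD parts (-2) "" = b ∧
      PySem.List.pyGetD parts (-3) "" = c := by
  have hlen : parts.length = r.length + 3 := by
    have := congrArg List.length h
    simpa [List.length_reverse] using this
  have g : ∀ (k : Nat) (hk1 : 0 < k) (hk : k ≤ parts.length),
      PySem.List.pyGetD parts (-(k : Int)) "" = parts.reverse[k - 1]'(by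
        simpa [List.length_reverse] using (by omega : k - 1 < parts.length)) := by
    intro k hk1 hk
    rw [PySem.List.pyGetD_neg_natCast parts k "" hk1 hk]
    rw [List.getElem_reverse]
    congr 1
    omega
  refine ⟨?_, ?_, ?_⟩
  · have := g 1 (by omega) (by omega)
    simpa [h] using this
  · have := g 2 (by omega) (by omega)
    simpa [h] using this
  · have := g 3 (by omega) (by omega)
    simpa [h] using this

-- A's branch structure equals the shift-register result, for any parts list
lemma branches_eq_fold (parts : List String) :
    (if parts = [] then ((none : Option String), (none : Option String), "")
     else if parts.length = 1 then (none, none, PySem.List.pyGetD parts 0 "")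
     else if parts.length = 2 then (none, some (PySem.List.pyGetD parts 0 ""), PySem.List.pyGetD parts 1 "")
     else (some (PySem.List.pyGetD parts (-3) ""), some (PySem.List.pyGetD parts (-2) ""),
           PySem.List.pyGetD parts (-1) ""))
    = (match parts.foldl (fun (s : Option String × Option String × Option String) p => (s.2.1, s.2.2, some p))
          ((none : Option String), (none : Option String), (none : Option String)) with
       | (c, d, some t) => (c, d, t)
       | _ => ((none : Option String), (none : Option String), "")) := by
  rw [fold_shift_char]
  rcases h : parts.reverse with _ | ⟨a, _ | ⟨b, _ | ⟨c, r⟩⟩⟩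
  · have : parts = [] := by simpa using congrArg List.reverse h
    subst this; simp
  · have : parts = [a] := by
      have := congrArg List.reverse h; simpa using this
    subst this
    simp [PySem.List.pyGetD, PySem.List.pyGet?, PySem.List.pyIdx?]
  · have : parts = [b, a] := by
      have := congrArg List.reverse h; simpa using this
    subst this
    simp [PySem.List.pyGetD, PySem.List.pyGet?, PySem.List.pyIdx?]
  · have hlen : parts.length = r.length + 3 := by
      have := congrArg List.length h
      simpa [List.length_reverse] using this
    obtain ⟨g1, g2, g3⟩ := pyGetD_neg_reverse parts a b c r h
    have hne : parts ≠ [] := by intro hnil; rw [hnil] at hlen; simp at hlen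
    rw [if_neg hne, if_neg (by omega), if_neg (by omega), g1, g2, g3]

-- B's guarded fold equals the shift fold over A's filtered-and-cleaned parts list
lemma foldB_eq (l : List String) :
    l.foldl (fun (s : Option String × Option String × Option String) part =>
        if PySem.Str.strip part ≠ "" then (s.2.1, s.2.2, some (PySem.Str.stripChars (PySem.Str.strip part) "`"))
        else s) (none, none, none)
      = ((l.filter (fun p => decide (PySem.Str.strip p ≠ ""))).map
            (fun p => PySem.Str.stripChars (PySem.Str.strip p) "`")).foldl
          (fun (s : Option String × Option String × Option String) p => (s.2.1, s.2.2, some p))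
          (none, none, none) := by
  rw [PySem.List.foldl_ite_eq_foldl_filter (fun part => PySem.Str.strip part ≠ ""), List.foldl_map]

-- ===== VERDICT (by name: the statement is the Claim_ definition above) =====
set_option maxHeartbeats 1000000 in
theorem split_table_parts_py_spec : Claim_equal_split_table_parts_py := by
  intro tn _
  unfold Spec_split_table_parts_py split_table_parts_py split_table_parts_py_alt
  simp only [foldB_eq]
  by_cases h : PySem.Str.stripChars (PySem.Str.strip tn) "`" = ""
  · rw [if_pos h, h]
    rw [← branches_eq_fold]
    have hp : ((((PySem.Str.split? "" ".").getD []).filter (fun p => decide (PySem.Str.strip p ≠ ""))).map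
        (fun p => PySem.Str.stripChars (PySem.Str.strip p) "`")) = [] := by decide
    rw [hp]
    simp
  · rw [if_neg h]
    rw [branches_eq_fold]
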